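-- pv_equiv track=rewrite | github.com/DoodleBears/split-lang | split_lang/split/splitter.py | _parse_without_zh_ja
-- ===== SOURCE A (Python) =====
-- from typing import Dict, List
--
-- def _parse_without_zh_ja(text: str):
--     words: List[str] = []
--     exist_space = False
--     chars = []
--     for char in text:
--         if char.isspace() is False:
--             if exist_space:
--                 words.append("".join(chars))
--                 chars.clear()
--                 exist_space = False
--             chars.append(char)
--         else:
--             exist_space = True
--             chars.append(char)
--     if len(chars) > 0:
--         words.append("".join(chars))
--
--     return words
-- ===== SOURCE B (Python) =====
-- def _parse_without_zh_ja(text: str):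
--     # Right-to-left scan: each char either starts a new segment (a space
--     # followed by a non-space word) or is prepended to the current first word.
--     words = []
--     for ch in reversed(text):
--         if words and ch.isspace() and not words[0][0].isspace():
--             words.insert(0, ch)
--         elif words:
--             words[0] = ch + words[0]
--         else:
--             words = [ch]
--     return words
-- ===== Notes on version B (the rewrite author's own statement) =====
-- stated objective: alternative
-- what changed: B scans the string right-to-left, deciding for each character whether it opens a new segment (space followed by a non-space word) or is prepended to the current first word, instead of A's forward accumulator with an exist_space flag and a final flush.
import Mathlib
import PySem

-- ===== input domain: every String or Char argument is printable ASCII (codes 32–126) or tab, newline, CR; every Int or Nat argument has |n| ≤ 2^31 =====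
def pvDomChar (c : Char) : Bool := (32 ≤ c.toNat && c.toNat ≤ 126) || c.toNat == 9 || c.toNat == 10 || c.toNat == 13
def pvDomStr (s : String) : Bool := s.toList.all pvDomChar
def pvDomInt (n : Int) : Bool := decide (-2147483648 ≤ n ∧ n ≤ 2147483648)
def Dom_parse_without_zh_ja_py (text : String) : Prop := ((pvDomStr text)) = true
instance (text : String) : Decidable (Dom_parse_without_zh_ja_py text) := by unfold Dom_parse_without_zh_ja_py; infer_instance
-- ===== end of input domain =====

-- B is an alternative decomposition: a right-to-left scan that prepends each
-- character to the current first segment or opens a new one, instead of A's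
-- forward accumulator with an exist_space flag and a final flush.

-- ===== PORT A =====
-- A's loop body: state = (words, exist_space, chars)
def pvStepA (st : List String × Bool × List Char) (char : Char) :
    List String × Bool × List Char :=
  if PySem.Chars.isspace char = false then
    if st.2.1 then (st.1 ++ [String.mk st.2.2], false, [char])
    else (st.1, st.2.1, st.2.2 ++ [char])
  else (st.1, true, st.2.2 ++ [char])

def parse_without_zh_ja_py (text : String) : List String :=
  let st := text.toList.foldl pvStepA ([], false, [])
  if st.2.2.length > 0 then st.1 ++ [String.mk st.2.2] else st.1

-- ===== PORT B =====
-- B's loop body over reversed(text): words kept as lists of chars, joined at the end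
def pvStepB (words : List (List Char)) (ch : Char) : List (List Char) :=
  match words with
  | [] => [[ch]]
  | w :: ws =>
    if PySem.Chars.isspace ch && !PySem.Chars.isspace (w.headD ' ') then
      [ch] :: w :: ws
    else (ch :: w) :: ws

def parse_without_zh_ja_py_alt (text : String) : List String :=
  (text.toList.reverse.foldl pvStepB []).map String.mk

-- ===== PRECONDITION & SPEC =====
def Spec_parse_without_zh_ja_py (text : String) (out : List String) : Prop := out = parse_without_zh_ja_py_alt text
instance (text : String) (out : List String) : Decidable (Spec_parse_without_zh_ja_py text out) := by unfold Spec_parse_without_zh_ja_py; infer_instance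

-- ===== CLAIM (what is proved, stated in full; the proofs are below) =====
def Claim_equal_parse_without_zh_ja_py : Prop := ∀ (text : String), Dom_parse_without_zh_ja_py text → Spec_parse_without_zh_ja_py text (parse_without_zh_ja_py text)

-- ===== LEMMAS AND PROOFS =====

-- B's reversed foldl as a foldr (structural recursion from the left)
def pvGr (s : List Char) : List (List Char) := s.foldr (fun c ws => pvStepB ws c) []

theorem pvGr_cons (c : Char) (cs : List Char) : pvGr (c :: cs) = pvStepB (pvGr cs) c := rfl

theorem alt_eq_gr (text : String) :
    parse_without_zh_ja_py_alt text = (pvGr text.toList).map String.mk := by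
  simp [parse_without_zh_ja_py_alt, pvGr, List.foldl_reverse]

-- how a pending state (ex, chars) of A merges with the groups of the rest
def pvGlue (ex : Bool) (chars : List Char) (gs : List (List Char)) : List (List Char) :=
  match gs with
  | [] => if chars = [] then [] else [chars]
  | g :: gs' =>
    if ex && !PySem.Chars.isspace (g.headD ' ') then chars :: g :: gs'
    else (chars ++ g) :: gs'

theorem pvGlue_false_nil (gs : List (List Char)) : pvGlue false [] gs = gs := by
  cases gs with
  | nil => rfl
  | cons g gs' => simp [pvGlue]

theorem pvMain (s : List Char) :
    ∀ (words : List String) (ex : Bool) (chars : List Char),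
    (let st := s.foldl pvStepA (words, ex, chars)
     if st.2.2.length > 0 then st.1 ++ [String.mk st.2.2] else st.1) =
      words ++ (pvGlue ex chars (pvGr s)).map String.mk := by
  induction s with
  | nil =>
    intro words ex chars
    cases chars with
    | nil => simp [pvGr, pvGlue]
    | cons a l => simp [pvGr, pvGlue]
  | cons d s' ih =>
    intro words ex chars
    rw [List.foldl_cons]
    by_cases hd : PySem.Chars.isspace d = false
    · cases ex with
      | true =>
        -- flush: words ++ [mk chars], fresh chars = [d]
        have : pvStepA (words, true, chars) d = (words ++ [String.mk chars], false, [d]) := by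
          simp [pvStepA, hd]
        rw [this, ih]
        rw [pvGr_cons]
        cases hg : pvGr s' with
        | nil => simp [pvStepB, pvGlue, hd]
        | cons g gs => simp [pvStepB, hd, pvGlue]
      | false =>
        have : pvStepA (words, false, chars) d = (words, false, chars ++ [d]) := by
          simp [pvStepA, hd]
        rw [this, ih]
        rw [pvGr_cons]
        cases hg : pvGr s' with
        | nil => simp [pvStepB, pvGlue]
        | cons g gs => simp [pvStepB, hd, pvGlue]
    · -- d is a space
      have hd' : PySem.Chars.isspace d = true := by
        cases h : PySem.Chars.isspace d
        · exact absurd h hd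
        · rfl
      have : pvStepA (words, ex, chars) d = (words, true, chars ++ [d]) := by
        simp [pvStepA, hd']
      rw [this, ih]
      rw [pvGr_cons]
      cases hg : pvGr s' with
      | nil => simp [pvStepB, pvGlue, hd']
      | cons g gs =>
        by_cases hh : PySem.Chars.isspace (g.head?.getD ' ') = false
        · simp [pvStepB, hd', hh, pvGlue]
        · simp [pvStepB, hd', hh, pvGlue]

-- ===== VERDICT (by name: the statement is the Claim_ definition above) =====
theorem parse_without_zh_ja_py_spec : Claim_equal_parse_without_zh_ja_py := by
  intro text _
  unfold Spec_parse_without_zh_ja_py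
  rw [alt_eq_gr]
  have h := pvMain text.toList [] false []
  simpa [parse_without_zh_ja_py, pvGlue_false_nil] using h
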